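-- pv_equiv track=rewrite | github.com/JunYupK/Algorithm | naver4.py | solution
-- ===== SOURCE A (Python) =====
-- from itertools import combinations
--
-- def solution(A):
--     # write your code in Python 3.6
--     answer = 0
--     for c in combinations(A, 3):
--         x1, y1 = c[0]
--         x2, y2 = c[1]
--         x3, y3 = c[2]
--         a = x1 * (y2 - y3) + x2 * (y3 - y1) + x3 * (y1 - y2)
--         if a == 0:
--             answer += 1
--     if answer == 0:
--         answer = -1
--     return answer
-- ===== SOURCE B (Python) =====
-- def _gcd(a, b):
--     while b:
--         a, b = b, a % b
--     return a
--
-- def _key(dx, dy):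
--     g = _gcd(abs(dx), abs(dy))
--     dx //= g
--     dy //= g
--     if dx < 0 or (dx == 0 and dy < 0):
--         dx, dy = -dx, -dy
--     return (dx, dy)
--
-- def solution(A):
--     total = 0
--     rest = A
--     while rest:
--         (x0, y0), rest = rest[0], rest[1:]
--         seen = 0
--         zeros = 0
--         counts = {}
--         for (x, y) in rest:
--             dx, dy = x - x0, y - y0
--             if dx == 0 and dy == 0:
--                 total += seen
--                 zeros += 1
--             else:
--                 k = _key(dx, dy)
--                 total += zeros + counts.get(k, 0)
--                 counts[k] = counts.get(k, 0) + 1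
--             seen += 1
--     return total if total else -1
-- ===== Notes on version B (the rewrite author's own statement) =====
-- stated objective: faster
-- what changed: Replaced the O(n^3) scan of all 3-element combinations by a per-anchor pass that hashes normalized slope directions of later points in a counter, adding earlier same-direction counts (duplicates of the anchor match everything), so each collinear triple is counted once at its first point.
import Mathlib
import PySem

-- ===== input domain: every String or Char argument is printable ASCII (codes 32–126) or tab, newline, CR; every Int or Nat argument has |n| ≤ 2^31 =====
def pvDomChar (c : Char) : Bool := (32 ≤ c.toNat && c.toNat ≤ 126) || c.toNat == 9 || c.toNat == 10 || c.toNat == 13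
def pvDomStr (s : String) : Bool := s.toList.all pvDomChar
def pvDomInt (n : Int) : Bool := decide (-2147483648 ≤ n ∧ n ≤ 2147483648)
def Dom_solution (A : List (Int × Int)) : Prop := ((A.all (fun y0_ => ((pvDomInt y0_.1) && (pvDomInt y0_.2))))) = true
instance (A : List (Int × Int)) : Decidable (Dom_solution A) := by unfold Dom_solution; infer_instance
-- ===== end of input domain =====

-- B changes the algorithm (per-anchor direction counting instead of scanning all triples); A's return value is proved equal on every input.

-- ===== PORT A =====
-- itertools.combinations(A, 2) / (A, 3) as the standard structural recursion
def pvCombos2 {α : Type} : List α → List (α × α)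
  | [] => []
  | x :: xs => (xs.map (fun y => (x, y))) ++ pvCombos2 xs

def pvCombos3 {α : Type} : List α → List (α × α × α)
  | [] => []
  | x :: xs => ((pvCombos2 xs).map (fun p => (x, p.1, p.2))) ++ pvCombos3 xs

-- a = x1*(y2-y3) + x2*(y3-y1) + x3*(y1-y2)
def pvArea (c : (Int × Int) × (Int × Int) × (Int × Int)) : Int :=
  c.1.1 * (c.2.1.2 - c.2.2.2) + c.2.1.1 * (c.2.2.2 - c.1.2) + c.2.2.1 * (c.1.2 - c.2.1.2)

def solution (A : List (Int × Int)) : Int :=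
  let answer := (pvCombos3 A).foldl (fun acc c => if pvArea c = 0 then acc + 1 else acc) 0
  if answer = 0 then -1 else answer

-- ===== PORT B =====
-- Source B _gcd: while b: a, b = b, a % b
def pvGcdB (a b : Int) : Int :=
  if _h : b = 0 then a else pvGcdB b (PySem.Int.mod a b)
termination_by b.natAbs
decreasing_by
  rcases lt_trichotomy b 0 with hb | hb | hb
  · have h1 := (PySem.Int.mod_neg_bounds a hb).1
    have h2 := (PySem.Int.mod_neg_bounds a hb).2
    omega
  · exact absurd hb _h
  · have h1 := PySem.Int.mod_nonneg a hb
    have h2 := PySem.Int.mod_lt a hb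
    omega

def pvKeyB (dx dy : Int) : Int × Int :=
  let g := pvGcdB (dx.natAbs : Int) (dy.natAbs : Int)
  let dx' := PySem.Int.floordiv dx g
  let dy' := PySem.Int.floordiv dy g
  if dx' < 0 ∨ (dx' = 0 ∧ dy' < 0) then (-dx', -dy') else (dx', dy')

def pvInnerB (x0 y0 : Int) : List (Int × Int) → Int → Int →
    PySem.Dict (Int × Int) Int → Int → Int
  | [], _, _, _, total => total
  | (x, y) :: rs, seen, zeros, counts, total =>
    let dx := x - x0
    let dy := y - y0
    if dx = 0 ∧ dy = 0 then
      pvInnerB x0 y0 rs (seen + 1) (zeros + 1) counts (total + seen)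
    else
      let k := pvKeyB dx dy
      pvInnerB x0 y0 rs (seen + 1) zeros (counts.insert k (counts.getD k 0 + 1))
        (total + zeros + counts.getD k 0)

def pvOuterB : List (Int × Int) → Int → Int
  | [], total => total
  | (x0, y0) :: rest, total =>
      pvOuterB rest (pvInnerB x0 y0 rest 0 0 PySem.Dict.empty total)

def solution_alt (A : List (Int × Int)) : Int :=
  let total := pvOuterB A 0
  if total = 0 then -1 else total

-- ===== PRECONDITION & SPEC =====
def Spec_solution (A : List (Int × Int)) (out : Int) : Prop := out = solution_alt A
instance (A : List (Int × Int)) (out : Int) : Decidable (Spec_solution A out) := by unfold Spec_solution; infer_instance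

-- ===== CLAIM (what is proved, stated in full; the proofs are below) =====
def Claim_equal_solution : Prop := ∀ (A : List (Int × Int)), Dom_solution A → Spec_solution A (solution A)

-- ===== LEMMAS AND PROOFS =====

-- the vector from the anchor to a point
def pvVec (x0 y0 : Int) (q : Int × Int) : Int × Int := (q.1 - x0, q.2 - y0)

-- cross product; triple (p,q,r) is collinear iff cross of (q-p) and (r-p) is 0
def pvCross (u v : Int × Int) : Int := u.1 * v.2 - u.2 * v.1

theorem pvArea_eq_cross (p q r : Int × Int) :
    pvArea (p, q, r) = pvCross (pvVec p.1 p.2 q) (pvVec p.1 p.2 r) := by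
  simp only [pvArea, pvCross, pvVec]; ring

-- gcdB on naturals is Nat.gcd
theorem pvGcdB_eq (a b : Nat) : pvGcdB (a : Int) (b : Int) = (Nat.gcd b a : Int) := by
  induction b using Nat.strong_induction_on generalizing a with
  | _ b ih =>
    rw [pvGcdB]
    by_cases hb : b = 0
    · subst hb; simp
    · have hb' : ((b : Nat) : Int) ≠ 0 := by exact_mod_cast hb
      rw [dif_neg hb', PySem.Int.mod_natCast,
        ih (a % b) (Nat.mod_lt _ (Nat.pos_of_ne_zero hb)) b]
      exact congrArg _ (Nat.gcd_rec b a).symm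

-- sign normalization applied to the reduced direction
def pvSignFix (p : Int × Int) : Int × Int :=
  if p.1 < 0 ∨ (p.1 = 0 ∧ p.2 < 0) then (-p.1, -p.2) else p

theorem pvSignFix_neg (p : Int × Int) (hp : ¬(p.1 = 0 ∧ p.2 = 0)) :
    pvSignFix (-p.1, -p.2) = pvSignFix p := by
  rcases p with ⟨a, b⟩
  simp only [pvSignFix]
  split_ifs with h1 h2 h2 <;> simp_all <;> omega

theorem pvSignFix_cases (p : Int × Int) :
    pvSignFix p = p ∨ pvSignFix p = (-p.1, -p.2) := by
  rcases p with ⟨a, b⟩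
  simp only [pvSignFix]
  split_ifs <;> simp

-- key of a nonzero vector = sign-normalized exact division by the gcd
theorem pvKeyB_eq (dx dy : Int) (h : ¬(dx = 0 ∧ dy = 0)) :
    pvKeyB dx dy =
      pvSignFix (dx / (Int.gcd dx dy : Int), dy / (Int.gcd dx dy : Int)) := by
  have hg : pvGcdB (dx.natAbs : Int) (dy.natAbs : Int) = (Int.gcd dx dy : Int) := by
    rw [pvGcdB_eq]
    norm_cast
    exact Nat.gcd_comm _ _
  have hgpos : (0 : Int) < (Int.gcd dx dy : Int) := by
    have : Int.gcd dx dy ≠ 0 := by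
      intro h0
      exact h (Int.gcd_eq_zero_iff.mp h0)
    omega
  have hf : ∀ a : Int, PySem.Int.floordiv a ((Int.gcd dx dy : Nat) : Int) = a / ((Int.gcd dx dy : Nat) : Int) :=
    fun a => PySem.Int.floordiv_eq_ediv_of_pos hgpos
  simp only [pvKeyB, hg, hf, pvSignFix]

-- nonzero vectors have zero cross product iff they share the normalized key
-- the gcd-reduced vector: exact division, coprime components, nonzero
theorem pvReduced_facts (a b : Int) (h : ¬(a = 0 ∧ b = 0)) :
    a = (Int.gcd a b : Int) * (a / (Int.gcd a b : Int)) ∧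
    b = (Int.gcd a b : Int) * (b / (Int.gcd a b : Int)) ∧
    Int.gcd (a / (Int.gcd a b : Int)) (b / (Int.gcd a b : Int)) = 1 := by
  have hgpos : 0 < Int.gcd a b := by
    rcases Nat.eq_zero_or_pos (Int.gcd a b) with h0 | h0
    · exact absurd (Int.gcd_eq_zero_iff.mp h0) h
    · exact h0
  refine ⟨?_, ?_, Int.gcd_div_gcd_div_gcd hgpos⟩
  · exact (Int.mul_ediv_cancel' (Int.gcd_dvd_left a b)).symm
  · exact (Int.mul_ediv_cancel' (Int.gcd_dvd_right a b)).symm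

-- two coprime reduced vectors that are parallel are equal up to sign
theorem pvCoprime_parallel (a b c d : Int) (hab : Int.gcd a b = 1)
    (hcd : Int.gcd c d = 1) (h : a * d = b * c) :
    (c, d) = (a, b) ∨ (c, d) = (-a, -b) := by
  have hab' : IsCoprime a b := Int.isCoprime_iff_gcd_eq_one.mpr hab
  have hcd' : IsCoprime c d := Int.isCoprime_iff_gcd_eq_one.mpr hcd
  have hac : a ∣ c := hab'.dvd_of_dvd_mul_left ⟨d, h.symm⟩
  have hca : c ∣ a := hcd'.dvd_of_dvd_mul_right ⟨b, by linarith⟩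
  have hbd : b ∣ d := (hab'.symm).dvd_of_dvd_mul_left ⟨c, by linarith⟩
  have hdb : d ∣ b := (hcd'.symm).dvd_of_dvd_mul_right ⟨a, by linarith⟩
  have hacn : a.natAbs = c.natAbs :=
    Nat.dvd_antisymm (Int.natAbs_dvd_natAbs.mpr hac) (Int.natAbs_dvd_natAbs.mpr hca)
  have hbdn : b.natAbs = d.natAbs :=
    Nat.dvd_antisymm (Int.natAbs_dvd_natAbs.mpr hbd) (Int.natAbs_dvd_natAbs.mpr hdb)
  by_cases ha : a = 0
  · subst ha
    have hc : c = 0 := by omega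
    subst hc
    have hb1 : b.natAbs = 1 := by simpa [Int.gcd] using hab
    rcases Int.natAbs_eq_iff.mp hb1 with hb | hb <;>
      rcases Int.natAbs_eq_iff.mp (hbdn ▸ hb1) with hd | hd <;>
        simp [hb, hd] <;> omega
  · rcases Int.natAbs_eq_natAbs_iff.mp hacn.symm with hc | hc
    · left
      have : a * d = a * b := by rw [h, hc]; ring
      have hd : d = b := mul_left_cancel₀ ha this
      rw [hc, hd]
    · right
      have : a * d = a * (-b) := by rw [h, hc]; ring
      have hd : d = -b := mul_left_cancel₀ ha this
      rw [hc, hd]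

theorem pvCross_zero_iff_key (u v : Int × Int) (hu : ¬(u.1 = 0 ∧ u.2 = 0))
    (hv : ¬(v.1 = 0 ∧ v.2 = 0)) :
    (pvCross u v = 0 ↔ pvKeyB u.1 u.2 = pvKeyB v.1 v.2) := by
  rcases u with ⟨a, b⟩
  rcases v with ⟨c, d⟩
  simp only at hu hv
  obtain ⟨ha, hb, hab⟩ := pvReduced_facts a b hu
  obtain ⟨hc, hd, hcd⟩ := pvReduced_facts c d hv
  set g1 : Int := (Int.gcd a b : Int) with hg1
  set g2 : Int := (Int.gcd c d : Int) with hg2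
  set a1 := a / g1
  set b1 := b / g1
  set c1 := c / g2
  set d1 := d / g2
  have hg1pos : (0 : Int) < g1 := by
    have : Int.gcd a b ≠ 0 := fun h0 => hu (Int.gcd_eq_zero_iff.mp h0)
    omega
  have hg2pos : (0 : Int) < g2 := by
    have : Int.gcd c d ≠ 0 := fun h0 => hv (Int.gcd_eq_zero_iff.mp h0)
    omega
  have hred1 : ¬(a1 = 0 ∧ b1 = 0) := by
    rintro ⟨h1, h2⟩
    exact hu ⟨by rw [ha, h1, mul_zero], by rw [hb, h2, mul_zero]⟩
  rw [pvKeyB_eq a b hu, pvKeyB_eq c d hv]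
  constructor
  · intro hcr
    have hpar : a1 * d1 = b1 * c1 := by
      have : g1 * g2 * (a1 * d1 - b1 * c1) = 0 := by
        have : a * d - b * c = 0 := by simpa [pvCross] using hcr
        calc g1 * g2 * (a1 * d1 - b1 * c1)
            = (g1 * a1) * (g2 * d1) - (g1 * b1) * (g2 * c1) := by ring
          _ = a * d - b * c := by rw [← ha, ← hb, ← hc, ← hd]
          _ = 0 := this
      have hne : g1 * g2 ≠ 0 := by positivity
      have := mul_eq_zero.mp this
      omega
    rcases pvCoprime_parallel a1 b1 c1 d1 hab hcd hpar with heq | heq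
    · rw [show ((c1, d1) : Int × Int) = (a1, b1) from heq]
    · rw [show ((c1, d1) : Int × Int) = (-a1, -b1) from heq]
      exact (pvSignFix_neg (a1, b1) hred1).symm ▸ rfl
  · intro hk
    have hcase1 := pvSignFix_cases (a1, b1)
    have hcase2 := pvSignFix_cases (c1, d1)
    have : (c1 = a1 ∧ d1 = b1) ∨ (c1 = -a1 ∧ d1 = -b1) := by
      rcases hcase1 with h1 | h1 <;> rcases hcase2 with h2 | h2 <;>
        rw [h1, h2] at hk <;>
        simp only [Prod.mk.injEq] at hk <;>
        [ exact Or.inl ⟨hk.1.symm, hk.2.symm⟩;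
          exact Or.inr ⟨by omega, by omega⟩;
          exact Or.inr ⟨by omega, by omega⟩;
          exact Or.inl ⟨by omega, by omega⟩ ]
    have : a1 * d1 - b1 * c1 = 0 := by rcases this with ⟨h1, h2⟩ | ⟨h1, h2⟩ <;> rw [h1, h2] <;> ring
    show a * d - b * c = 0
    calc a * d - b * c = (g1 * a1) * (g2 * d1) - (g1 * b1) * (g2 * c1) := by
          rw [← ha, ← hb, ← hc, ← hd]
      _ = g1 * g2 * (a1 * d1 - b1 * c1) := by ring
      _ = 0 := by rw [this]; ring

-- counting helpers
def pvCollB (x0 y0 : Int) (q r : Int × Int) : Bool :=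
  pvCross (pvVec x0 y0 q) (pvVec x0 y0 r) == 0

def pvWithin (x0 y0 : Int) (L : List (Int × Int)) : Nat :=
  (pvCombos2 L).countP (fun p => pvCollB x0 y0 p.1 p.2)

def pvBetween (x0 y0 : Int) (P L : List (Int × Int)) : Nat :=
  (L.map (fun r => P.countP (fun q => pvCollB x0 y0 q r))).sum

theorem pvCollB_zero_left (x0 y0 : Int) (q r : Int × Int)
    (h : q.1 - x0 = 0 ∧ q.2 - y0 = 0) : pvCollB x0 y0 q r = true := by
  simp [pvCollB, pvCross, pvVec, h.1, h.2]

theorem pvCollB_zero_right (x0 y0 : Int) (q r : Int × Int)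
    (h : r.1 - x0 = 0 ∧ r.2 - y0 = 0) : pvCollB x0 y0 q r = true := by
  simp [pvCollB, pvCross, pvVec, h.1, h.2]

theorem pvCollB_key (x0 y0 : Int) (q r : Int × Int)
    (hq : ¬(q.1 - x0 = 0 ∧ q.2 - y0 = 0)) (hr : ¬(r.1 - x0 = 0 ∧ r.2 - y0 = 0)) :
    pvCollB x0 y0 q r = (pvKeyB (q.1 - x0) (q.2 - y0) == pvKeyB (r.1 - x0) (r.2 - y0)) := by
  have hiff := pvCross_zero_iff_key (q.1 - x0, q.2 - y0) (r.1 - x0, r.2 - y0) hq hr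
  simp only [pvCollB, pvVec]
  rw [Bool.eq_iff_iff]
  simp only [beq_iff_eq]
  exact hiff

theorem pvBetween_cons (x0 y0 : Int) (P : List (Int × Int)) (r : Int × Int)
    (L : List (Int × Int)) :
    pvBetween x0 y0 P (r :: L) =
      P.countP (fun q => pvCollB x0 y0 q r) + pvBetween x0 y0 P L := by
  simp [pvBetween]

theorem pvBetween_snoc (x0 y0 : Int) (P : List (Int × Int)) (r : Int × Int)
    (L : List (Int × Int)) :
    pvBetween x0 y0 (P ++ [r]) L =
      pvBetween x0 y0 P L + L.countP (fun s => pvCollB x0 y0 r s) := by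
  induction L with
  | nil => simp [pvBetween]
  | cons s L ih =>
    rw [pvBetween_cons, pvBetween_cons, ih]
    simp only [List.countP_append, List.countP_cons, List.countP_nil]
    by_cases h : pvCollB x0 y0 r s = true <;> simp [h] <;> omega

theorem pvWithin_cons (x0 y0 : Int) (r : Int × Int) (L : List (Int × Int)) :
    pvWithin x0 y0 (r :: L) =
      L.countP (fun s => pvCollB x0 y0 r s) + pvWithin x0 y0 L := by
  simp only [pvWithin, pvCombos2, List.countP_append, List.countP_map]
  simp only [Function.comp_def]

theorem pvCount_split (x0 y0 : Int) (P : List (Int × Int)) (r : Int × Int)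
    (hr : ¬(r.1 - x0 = 0 ∧ r.2 - y0 = 0)) :
    P.countP (fun q => pvCollB x0 y0 q r) =
      P.countP (fun q => q.1 - x0 = 0 && q.2 - y0 = 0) +
      (P.filter (fun q => !(q.1 - x0 = 0 && q.2 - y0 = 0))).countP
        (fun q => pvKeyB (q.1 - x0) (q.2 - y0) == pvKeyB (r.1 - x0) (r.2 - y0)) := by
  induction P with
  | nil => simp
  | cons q P ih =>
    simp only [List.countP_cons, List.filter_cons]
    by_cases hq : q.1 - x0 = 0 ∧ q.2 - y0 = 0
    · rw [pvCollB_zero_left x0 y0 q r hq]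
      simp only [hq.1, hq.2]
      simp only [ih]
      simp
      omega
    · rw [pvCollB_key x0 y0 q r hq hr]
      have hq' : (decide (q.1 - x0 = 0) && decide (q.2 - y0 = 0)) = false := by
        rcases Decidable.not_and_iff_not_or_not.mp hq with h | h <;> simp [h]
      simp only [hq', Bool.not_false, if_true, Bool.false_eq_true, if_false,
        List.countP_cons]
      omega

theorem pvInnerB_spec (x0 y0 : Int) (rest P : List (Int × Int)) (counts : PySem.Dict (Int × Int) Int) (total : Int)
    (hz : ∀ k, counts.getD k 0 =
      ((P.filter (fun q => !(q.1 - x0 = 0 && q.2 - y0 = 0))).countP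
        (fun q => pvKeyB (q.1 - x0) (q.2 - y0) == k) : Int)) :
    pvInnerB x0 y0 rest (P.length : Int)
      ((P.countP (fun q => q.1 - x0 = 0 && q.2 - y0 = 0)) : Int) counts total =
    total + pvBetween x0 y0 P rest + pvWithin x0 y0 rest := by
  induction rest generalizing P counts total with
  | nil => simp [pvInnerB, pvBetween, pvWithin, pvCombos2]
  | cons r rs ih =>
    obtain ⟨x, y⟩ := r
    rw [pvInnerB]
    rw [pvBetween_cons, pvWithin_cons]
    by_cases h : x - x0 = 0 ∧ y - y0 = 0
    · rw [if_pos h]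
      have hlen : ((P ++ [(x, y)]).length : Int) = (P.length : Int) + 1 := by
        simp
      have hzc : (((P ++ [(x, y)]).countP
          (fun q => q.1 - x0 = 0 && q.2 - y0 = 0)) : Int) =
          ((P.countP (fun q => q.1 - x0 = 0 && q.2 - y0 = 0)) : Int) + 1 := by
        simp [List.countP_append, h.1, h.2]
      have hz' : ∀ k, counts.getD k 0 =
          (((P ++ [(x, y)]).filter (fun q => !(q.1 - x0 = 0 && q.2 - y0 = 0))).countP
            (fun q => pvKeyB (q.1 - x0) (q.2 - y0) == k) : Int) := by
        intro k
        rw [hz k]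
        simp [List.filter_append, h.1, h.2]
      have IH := ih (P ++ [(x, y)]) counts (total + (P.length : Int)) hz'
      rw [hlen, hzc] at IH
      rw [IH, pvBetween_snoc]
      have hcount : P.countP (fun q => pvCollB x0 y0 q (x, y)) = P.length :=
        List.countP_eq_length.mpr (fun q _ => pvCollB_zero_right x0 y0 q (x, y) h)
      rw [hcount]
      push_cast
      ring
    · rw [if_neg h]
      have hzc : (((P ++ [(x, y)]).countP
          (fun q => q.1 - x0 = 0 && q.2 - y0 = 0)) : Int) =
          ((P.countP (fun q => q.1 - x0 = 0 && q.2 - y0 = 0)) : Int) := by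
        have h' : (decide (x - x0 = 0) && decide (y - y0 = 0)) = false := by
          rcases Decidable.not_and_iff_not_or_not.mp h with h0 | h0 <;> simp [h0]
        simp [List.countP_append, h']
      have hz' : ∀ k, (counts.insert (pvKeyB (x - x0) (y - y0))
            (counts.getD (pvKeyB (x - x0) (y - y0)) 0 + 1)).getD k 0 =
          (((P ++ [(x, y)]).filter (fun q => !(q.1 - x0 = 0 && q.2 - y0 = 0))).countP
            (fun q => pvKeyB (q.1 - x0) (q.2 - y0) == k) : Int) := by
        intro k
        rw [PySem.Dict.getD_insert]
        have h' : (decide (x - x0 = 0) && decide (y - y0 = 0)) = false := by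
          rcases Decidable.not_and_iff_not_or_not.mp h with h0 | h0 <;> simp [h0]
        rw [List.filter_append]
        simp only [List.filter_cons, h', Bool.not_false, if_true, List.filter_nil,
          List.countP_append, List.countP_cons, List.countP_nil]
        by_cases hk : k = pvKeyB (x - x0) (y - y0)
        · rw [if_pos hk]
          subst hk
          rw [hz]
          push_cast
          simp
        · rw [if_neg hk, hz k]
          have : (pvKeyB (x - x0) (y - y0) == k) = false := by
            simp
            exact fun he => hk he.symm
          simp [this]
      have IH := ih (P ++ [(x, y)]) _ (total + ((P.countP
          (fun q => q.1 - x0 = 0 && q.2 - y0 = 0)) : Int) +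
          counts.getD (pvKeyB (x - x0) (y - y0)) 0) hz'
      have hlen : ((P ++ [(x, y)]).length : Int) = (P.length : Int) + 1 := by simp
      rw [hlen, hzc] at IH
      rw [IH, pvBetween_snoc]
      rw [pvCount_split x0 y0 P (x, y) h, hz (pvKeyB ((x, y).1 - x0) ((x, y).2 - y0))]
      push_cast
      ring

theorem pvOuterB_spec (A : List (Int × Int)) (total : Int) :
    pvOuterB A total = total +
      ((pvCombos3 A).countP (fun c => pvArea c == 0) : Int) := by
  induction A generalizing total with
  | nil => simp [pvOuterB, pvCombos3]
  | cons p rest ih =>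
    obtain ⟨x0, y0⟩ := p
    rw [pvOuterB]
    have hinner := pvInnerB_spec x0 y0 rest [] PySem.Dict.empty total
      (fun k => by simp [PySem.Dict.getD_empty])
    have hbet : pvBetween x0 y0 [] rest = 0 := by
      simp [pvBetween]
    rw [hbet] at hinner
    simp only [List.length_nil, List.countP_nil, Nat.cast_zero, add_zero] at hinner
    rw [hinner, ih]
    have hw : pvWithin x0 y0 rest =
        (pvCombos2 rest).countP (fun q => pvArea ((x0, y0), q.1, q.2) == 0) := by
      apply List.countP_congr
      intro q _
      simp only [pvCollB, pvArea_eq_cross ((x0, y0) : Int × Int) q.1 q.2]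
    rw [hw]
    simp only [pvCombos3, List.countP_append, List.countP_map, Function.comp_def]
    push_cast
    ring

theorem pvFoldl_count (L : List ((Int × Int) × (Int × Int) × (Int × Int))) (acc : Int) :
    L.foldl (fun acc c => if pvArea c = 0 then acc + 1 else acc) acc =
      acc + (L.countP (fun c => pvArea c == 0) : Int) := by
  induction L generalizing acc with
  | nil => simp
  | cons c cs ih =>
    simp only [List.foldl_cons, List.countP_cons, ih]
    by_cases h : pvArea c = 0 <;> simp [h] <;> omega

-- ===== VERDICT (by name: the statement is the Claim_ definition above) =====
theorem solution_spec : Claim_equal_solution := by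
  intro A _
  show solution A = solution_alt A
  simp only [solution, solution_alt, pvFoldl_count, pvOuterB_spec, zero_add]
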